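-- pv_equiv track=rewrite | github.com/r3coder/vodka-ai-contest-1-reversi | RenegadeGame.py | GetDirectionPositions
-- ===== SOURCE A (Python) =====
-- def GetDirectionPositions(direction, pos, includeSelf=False):
--     assert type(direction) is int and direction >= 0 and direction <= 7
--     assert type(pos) is tuple
--     assert type(pos[0]) is int and pos[0] >= 0 and pos[0] <= 7
--     assert type(pos[1]) is int and pos[1] >= 0 and pos[1] <= 7
--     assert type(includeSelf) is bool
--
--     out = list()
--     if includeSelf:
--         out.append(pos)
--     while True:
--         if   direction == 0:
--             pos = (pos[0]+1, pos[1]  )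
--         elif direction == 1:
--             pos = (pos[0]+1, pos[1]+1)
--         elif direction == 2:
--             pos = (pos[0]  , pos[1]+1)
--         elif direction == 3:
--             pos = (pos[0]-1, pos[1]+1)
--         elif direction == 4:
--             pos = (pos[0]-1, pos[1]  )
--         elif direction == 5:
--             pos = (pos[0]-1, pos[1]-1)
--         elif direction == 6:
--             pos = (pos[0]  , pos[1]-1)
--         elif direction == 7:
--             pos = (pos[0]+1, pos[1]-1)
--         if pos[0] > 7 or pos[1] > 7 or pos[0] < 0 or pos[1] < 0:
--             break
--         out.append(pos)
--     return out
-- ===== SOURCE B (Python) =====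
-- _DELTAS = [(1, 0), (1, 1), (0, 1), (-1, 1), (-1, 0), (-1, -1), (0, -1), (1, -1)]
--
-- def GetDirectionPositions(direction, pos, includeSelf=False):
--     assert type(direction) is int and direction >= 0 and direction <= 7
--     assert type(pos) is tuple
--     assert type(pos[0]) is int and pos[0] >= 0 and pos[0] <= 7
--     assert type(pos[1]) is int and pos[1] >= 0 and pos[1] <= 7
--     assert type(includeSelf) is bool
--
--     dx, dy = _DELTAS[direction]
--     cands = []
--     if dx:
--         cands.append(7 - pos[0] if dx > 0 else pos[0])
--     if dy:
--         cands.append(7 - pos[1] if dy > 0 else pos[1])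
--     k = min(cands)
--     out = [(pos[0] + i * dx, pos[1] + i * dy) for i in range(1, k + 1)]
--     return ([pos] + out) if includeSelf else out
-- ===== Notes on version B (the rewrite author's own statement) =====
-- stated objective: simpler
-- what changed: Replaces A's step-until-out-of-bounds while loop with a direction->delta table and a closed-form count of in-bounds steps, producing the ray with a single comprehension.
import Mathlib
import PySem

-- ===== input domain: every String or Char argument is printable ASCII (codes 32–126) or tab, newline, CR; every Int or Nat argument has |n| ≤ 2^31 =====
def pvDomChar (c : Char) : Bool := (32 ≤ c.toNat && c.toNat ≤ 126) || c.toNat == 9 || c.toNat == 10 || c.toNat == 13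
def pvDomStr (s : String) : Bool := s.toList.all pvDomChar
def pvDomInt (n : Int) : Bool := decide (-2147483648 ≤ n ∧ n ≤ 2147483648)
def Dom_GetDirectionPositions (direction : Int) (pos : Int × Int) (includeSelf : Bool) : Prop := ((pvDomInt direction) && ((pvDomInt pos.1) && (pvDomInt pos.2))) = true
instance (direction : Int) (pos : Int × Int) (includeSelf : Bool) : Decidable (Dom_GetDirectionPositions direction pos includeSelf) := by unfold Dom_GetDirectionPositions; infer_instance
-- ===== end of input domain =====

-- B replaces A's step-until-out-of-bounds while loop with a delta table and a
-- closed-form step count; proved equal on the asserted domain (Pre_).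

-- ===== PORT A =====
-- A's while loop: one step in the given direction, then break if out of bounds,
-- else append.  The loop runs at most 7 iterations on the asserted domain; the
-- fuel (16) only makes the recursion total and is never exhausted inside Pre_.
def pvAStep (direction : Int) (pos : Int × Int) : Int × Int :=
  if direction = 0 then (pos.1 + 1, pos.2)
  else if direction = 1 then (pos.1 + 1, pos.2 + 1)
  else if direction = 2 then (pos.1, pos.2 + 1)
  else if direction = 3 then (pos.1 - 1, pos.2 + 1)
  else if direction = 4 then (pos.1 - 1, pos.2)
  else if direction = 5 then (pos.1 - 1, pos.2 - 1)
  else if direction = 6 then (pos.1, pos.2 - 1)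
  else if direction = 7 then (pos.1 + 1, pos.2 - 1)
  else pos

def pvALoop (fuel : Nat) (direction : Int) (pos : Int × Int) (out : List (Int × Int)) : List (Int × Int) :=
  match fuel with
  | 0 => out
  | f + 1 =>
    let p := pvAStep direction pos
    if p.1 > 7 ∨ p.2 > 7 ∨ p.1 < 0 ∨ p.2 < 0 then out
    else pvALoop f direction p (out ++ [p])

def GetDirectionPositions (direction : Int) (pos : Int × Int) (includeSelf : Bool) : List (Int × Int) :=
  pvALoop 16 direction pos (if includeSelf then [pos] else [])

-- ===== PORT B =====
def pvDeltas : List (Int × Int) := [(1, 0), (1, 1), (0, 1), (-1, 1), (-1, 0), (-1, -1), (0, -1), (1, -1)]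

def GetDirectionPositions_alt (direction : Int) (pos : Int × Int) (includeSelf : Bool) : List (Int × Int) :=
  let d := (PySem.List.pyGet? pvDeltas direction).getD (0, 0)
  let cands : List Int :=
    (if d.1 ≠ 0 then [if d.1 > 0 then 7 - pos.1 else pos.1] else []) ++
    (if d.2 ≠ 0 then [if d.2 > 0 then 7 - pos.2 else pos.2] else [])
  let k := (PySem.List.min? cands (fun x => x)).getD 0
  let out := (PySem.List.pyRange 1 (k + 1) 1).map (fun i => (pos.1 + i * d.1, pos.2 + i * d.2))
  if includeSelf then pos :: out else out

-- ===== PRECONDITION & SPEC =====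
-- Pre_ is exactly A's asserts: direction in 0..7 and both coordinates in 0..7
-- (outside it A raises AssertionError).
def Pre_GetDirectionPositions (direction : Int) (pos : Int × Int) (includeSelf : Bool) : Prop :=
  0 ≤ direction ∧ direction ≤ 7 ∧ 0 ≤ pos.1 ∧ pos.1 ≤ 7 ∧ 0 ≤ pos.2 ∧ pos.2 ≤ 7
instance (direction : Int) (pos : Int × Int) (includeSelf : Bool) : Decidable (Pre_GetDirectionPositions direction pos includeSelf) := by unfold Pre_GetDirectionPositions; infer_instance

def pvWitness_GetDirectionPositions : Int × (Int × Int) × Bool := (3, (2, 6), false)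

def Spec_GetDirectionPositions (direction : Int) (pos : Int × Int) (includeSelf : Bool) (out : List (Int × Int)) : Prop := out = GetDirectionPositions_alt direction pos includeSelf
instance (direction : Int) (pos : Int × Int) (includeSelf : Bool) (out : List (Int × Int)) : Decidable (Spec_GetDirectionPositions direction pos includeSelf out) := by unfold Spec_GetDirectionPositions; infer_instance

-- ===== CLAIM (what is proved, stated in full; the proofs are below) =====
def Claim_equal_GetDirectionPositions : Prop := ∀ (direction : Int) (pos : Int × Int) (includeSelf : Bool), Dom_GetDirectionPositions direction pos includeSelf → Pre_GetDirectionPositions direction pos includeSelf → Spec_GetDirectionPositions direction pos includeSelf (GetDirectionPositions direction pos includeSelf)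

-- ===== LEMMAS AND PROOFS =====

-- ===== VERDICT (by name: the statement is the Claim_ definition above) =====
set_option maxHeartbeats 4000000 in
theorem GetDirectionPositions_spec : Claim_equal_GetDirectionPositions := by
  intro direction pos includeSelf _ hpre
  obtain ⟨x, y⟩ := pos
  obtain ⟨h1, h2, h3, h4, h5, h6⟩ := hpre
  simp only at h3 h4 h5 h6
  unfold Spec_GetDirectionPositions
  revert includeSelf
  interval_cases direction <;> interval_cases x <;> interval_cases y <;> decide
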